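-- pv_equiv track=rewrite | github.com/quantaosun/cdx-to-smiles-extractor | src/extract_cdx.py | _gap_sort_slide
-- ===== SOURCE A (Python) =====
-- def _gap_sort_slide(objects: list[tuple[int, int, str]]) -> list[tuple[int, int, str]]:
--     """
--     Sort (y, x, ole_name) tuples into visual reading order using gap-based row detection.
--
--     Algorithm
--     ---------
--     1. Sort all objects by y-coordinate.
--     2. Identify row boundaries wherever the y-gap between consecutive objects
--        exceeds a threshold (90 pt = ~3 cm). This is robust to small misalignments
--        because real row gaps in a slide are always much larger than within-row
--        y-variation.
--     3. Within each detected row, sort left-to-right by x-coordinate.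
--
--     This approach works correctly regardless of whether structures are perfectly
--     aligned on the slide grid.
--     """
--     if not objects:
--         return []
--     # 90 pt in EMU: 90 * 914400 / 72
--     ROW_GAP_THRESHOLD = int(90 * 914400 / 72)
--     by_y = sorted(objects, key=lambda t: t[0])
--     rows: list[list] = []
--     current_row = [by_y[0]]
--     for i in range(1, len(by_y)):
--         if by_y[i][0] - by_y[i - 1][0] > ROW_GAP_THRESHOLD:
--             rows.append(current_row)
--             current_row = [by_y[i]]
--         else:
--             current_row.append(by_y[i])
--     rows.append(current_row)
--     result = []
--     for row in rows:
--         result.extend(sorted(row, key=lambda t: t[1]))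
--     return result
-- ===== SOURCE B (Python) =====
-- def _gap_sort_slide(objects: list[tuple[int, int, str]]) -> list[tuple[int, int, str]]:
--     """Annotate each object with an integer row id in one pass over the y-sorted
--     list, then do a single stable sort keyed by (row_id, x)."""
--     if not objects:
--         return []
--     ROW_GAP_THRESHOLD = int(90 * 914400 / 72)
--     by_y = sorted(objects, key=lambda t: t[0])
--     rid = 0
--     keyed = [(0, by_y[0])]
--     for prev, cur in zip(by_y, by_y[1:]):
--         if cur[0] - prev[0] > ROW_GAP_THRESHOLD:
--             rid += 1
--         keyed.append((rid, cur))
--     keyed.sort(key=lambda p: (p[0], p[1][1]))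
--     return [t for _, t in keyed]
-- ===== Notes on version B (the rewrite author's own statement) =====
-- stated objective: simpler
-- what changed: Replaces A's build-rows-as-nested-lists-then-sort-each-row-and-extend shape with a flat one: annotate each y-sorted element with an incrementing row id and perform a single stable sort keyed by (row_id, x).
import Mathlib
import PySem

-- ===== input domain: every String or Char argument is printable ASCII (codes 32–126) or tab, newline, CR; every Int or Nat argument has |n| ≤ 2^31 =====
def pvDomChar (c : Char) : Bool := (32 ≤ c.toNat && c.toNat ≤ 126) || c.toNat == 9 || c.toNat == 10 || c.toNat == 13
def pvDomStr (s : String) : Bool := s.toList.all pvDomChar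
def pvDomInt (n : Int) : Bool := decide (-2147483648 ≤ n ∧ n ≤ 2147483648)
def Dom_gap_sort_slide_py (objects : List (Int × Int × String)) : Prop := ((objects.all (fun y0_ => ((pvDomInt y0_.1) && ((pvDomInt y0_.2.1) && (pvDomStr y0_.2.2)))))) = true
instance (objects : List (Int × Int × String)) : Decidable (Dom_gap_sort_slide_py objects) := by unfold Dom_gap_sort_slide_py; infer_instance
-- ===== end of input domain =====

-- B replaces A's group-rows-into-lists-then-sort-each-row shape by annotating each
-- object with a row id in one pass and doing a single stable (row_id, x) sort; same
-- asymptotic cost, simpler flat decomposition.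

-- ===== PORT A =====
-- int(90 * 914400 / 72) = 1143000 exactly (the float division is exact), ported as the literal
def gap_sort_slide_py (objects : List (Int × Int × String)) : List (Int × Int × String) :=
  if objects = [] then [] else
    let T : Int := 1143000
    let by_y := PySem.List.sorted objects (fun t => t.1) false
    let st := (PySem.List.pyRange 1 (PySem.List.len by_y) 1).foldl
      (fun (st : List (List (Int × Int × String)) × List (Int × Int × String)) i =>
        if (PySem.List.pyGetD by_y i (0,0,"")).1 - (PySem.List.pyGetD by_y (i-1) (0,0,"")).1 > T
        then (st.1 ++ [st.2], [PySem.List.pyGetD by_y i (0,0,"")])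
        else (st.1, st.2 ++ [PySem.List.pyGetD by_y i (0,0,"")]))
      ([], [PySem.List.pyGetD by_y 0 (0,0,"")])
    let rows := st.1 ++ [st.2]
    rows.foldl (fun acc row => acc ++ PySem.List.sorted row (fun t => t.2.1) false) []

-- ===== PORT B =====
def gap_sort_slide_py_alt (objects : List (Int × Int × String)) : List (Int × Int × String) :=
  if objects = [] then [] else
    let T : Int := 1143000
    let by_y := PySem.List.sorted objects (fun t => t.1) false
    let st := (by_y.zip (PySem.List.slice by_y (some 1) none)).foldl
      (fun (st : Int × List (Int × (Int × Int × String))) pc =>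
        let rid := if pc.2.1 - pc.1.1 > T then st.1 + 1 else st.1
        (rid, st.2 ++ [(rid, pc.2)]))
      (0, [((0 : Int), PySem.List.pyGetD by_y 0 (0,0,""))])
    (PySem.List.sorted2 st.2 (fun p => p.1) (fun p => p.2.2.1) false).map (fun p => p.2)

-- ===== PRECONDITION & SPEC =====
def Spec_gap_sort_slide_py (objects : List (Int × Int × String)) (out : List (Int × Int × String)) : Prop := out = gap_sort_slide_py_alt objects
instance (objects : List (Int × Int × String)) (out : List (Int × Int × String)) : Decidable (Spec_gap_sort_slide_py objects out) := by unfold Spec_gap_sort_slide_py; infer_instance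

-- ===== CLAIM (what is proved, stated in full; the proofs are below) =====
def Claim_equal_gap_sort_slide_py : Prop := ∀ (objects : List (Int × Int × String)), Dom_gap_sort_slide_py objects → Spec_gap_sort_slide_py objects (gap_sort_slide_py objects)

-- ===== LEMMAS AND PROOFS =====

-- the comparison sorted2 st.2 (·.1) (·.2.2.1) uses, made explicit
def pvBefore2 (a b : Int × (Int × Int × String)) : Bool :=
  decide (a.1 < b.1) || (!decide (b.1 < a.1) && decide (a.2.2.1 < b.2.2.1))

theorem pvSorted2_eq (l : List (Int × (Int × Int × String))) :
    PySem.List.sorted2 l (fun p => p.1) (fun p => p.2.2.1) false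
      = l.foldl (fun acc x => PySem.List.insertBy pvBefore2 x acc) [] := rfl

-- rows annotated with consecutive integer row ids starting at n
def pvAnnot (n : Int) : List (List (Int × Int × String)) → List (Int × (Int × Int × String))
  | [] => []
  | r :: rs => r.map (fun t => (n, t)) ++ pvAnnot (n + 1) rs

theorem pvAnnot_fst_le (n : Int) (rs : List (List (Int × Int × String))) :
    ∀ p ∈ pvAnnot n rs, n ≤ p.1 := by
  induction rs generalizing n with
  | nil => simp [pvAnnot]
  | cons r rs ih =>
    intro p hp
    simp only [pvAnnot, List.mem_append, List.mem_map] at hp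
    rcases hp with ⟨t, _, rfl⟩ | hp
    · exact le_refl n
    · exact le_trans (by omega) (ih (n + 1) p hp)

theorem pvAnnot_append_singleton (n : Int) (rs : List (List (Int × Int × String))) (r : List (Int × Int × String)) :
    pvAnnot n (rs ++ [r]) = pvAnnot n rs ++ r.map (fun t => (n + (rs.length : Int), t)) := by
  induction rs generalizing n with
  | nil => simp [pvAnnot]
  | cons q qs ih =>
    simp only [List.cons_append, pvAnnot, ih (n + 1), List.append_assoc, List.length_cons]
    have hc : n + 1 + (qs.length : Int) = n + ((qs.length : Nat) + 1 : Nat) := by push_cast; ring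
    rw [hc]

theorem pvAnnot_map_snd (n : Int) (rs : List (List (Int × Int × String))) :
    (pvAnnot n rs).map (fun p => p.2) = rs.flatten := by
  induction rs generalizing n with
  | nil => simp [pvAnnot]
  | cons r qs ih => simp [pvAnnot, ih (n + 1)]

theorem pvInsertBy_append_left {α : Type} (before : α → α → Bool) (x : α) (S acc : List α)
    (h : ∀ a ∈ S, before x a = false) :
    PySem.List.insertBy before x (S ++ acc) = S ++ PySem.List.insertBy before x acc := by
  induction S with
  | nil => rfl
  | cons a S ih =>
    have ha : before x a = false := h a (by simp)
    simp [PySem.List.insertBy, ha, ih (fun a ha' => h a (by simp [ha']))]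

theorem pvFoldl_ins_append {α : Type} (before : α → α → Bool) (l S acc : List α)
    (h : ∀ b ∈ l, ∀ a ∈ S, before b a = false) :
    l.foldl (fun acc x => PySem.List.insertBy before x acc) (S ++ acc)
      = S ++ l.foldl (fun acc x => PySem.List.insertBy before x acc) acc := by
  induction l generalizing acc with
  | nil => rfl
  | cons b l ih =>
    simp only [List.foldl_cons]
    rw [pvInsertBy_append_left before b S acc (h b (by simp)),
        ih _ (fun b' hb' a ha => h b' (by simp [hb']) a ha)]

-- stable sort of two blocks whose first keys are strictly separated splits
theorem pvSorted2_append (l1 l2 : List (Int × (Int × Int × String)))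
    (h : ∀ a ∈ l1, ∀ b ∈ l2, a.1 < b.1) :
    PySem.List.sorted2 (l1 ++ l2) (fun p => p.1) (fun p => p.2.2.1) false
      = PySem.List.sorted2 l1 (fun p => p.1) (fun p => p.2.2.1) false
        ++ PySem.List.sorted2 l2 (fun p => p.1) (fun p => p.2.2.1) false := by
  simp only [pvSorted2_eq, List.foldl_append]
  have hS : ∀ a ∈ l1.foldl (fun acc x => PySem.List.insertBy pvBefore2 x acc) [], a ∈ l1 := by
    intro a ha
    have := (PySem.List.sorted2_perm (xs := l1) (k1 := fun p => p.1) (k2 := fun p => p.2.2.1) (rev := false)).mem_iff (a := a)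
    rw [pvSorted2_eq] at this
    exact this.mp ha
  have := pvFoldl_ins_append pvBefore2 l2
    (l1.foldl (fun acc x => PySem.List.insertBy pvBefore2 x acc) []) []
    (by
      intro b hb a haS
      have hlt := h a (hS a haS) b hb
      simp only [pvBefore2]
      have h1 : ¬ b.1 < a.1 := by omega
      have h2 : a.1 < b.1 := hlt
      simp [h1, h2])
  simpa using this

theorem pvMap_insertBy {α β : Type} (f : α → β) (b1 : α → α → Bool) (b2 : β → β → Bool)
    (hf : ∀ a b : α, b2 (f a) (f b) = b1 a b) (x : α) (l : List α) :
    (PySem.List.insertBy b1 x l).map f = PySem.List.insertBy b2 (f x) (l.map f) := by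
  induction l with
  | nil => rfl
  | cons a l ih =>
    by_cases hb : b1 x a = true
    · simp [PySem.List.insertBy, hb, hf]
    · simp only [Bool.not_eq_true] at hb
      simp [PySem.List.insertBy, hb, hf, ih]

-- a constant-row-id block sorts by x under the (row_id, x) key
theorem pvSorted2_block (n : Int) (r : List (Int × Int × String)) :
    PySem.List.sorted2 (r.map (fun t => (n, t))) (fun p => p.1) (fun p => p.2.2.1) false
      = (PySem.List.sorted r (fun t => t.2.1) false).map (fun t => (n, t)) := by
  rw [pvSorted2_eq, PySem.List.sorted_eq_foldl_insertBy, List.foldl_map]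
  induction r using List.reverseRecOn with
  | nil => rfl
  | append_singleton r x ih =>
    simp only [List.foldl_append, List.foldl_cons, List.foldl_nil, ih]
    rw [pvMap_insertBy (fun t => ((n : Int), t)) (fun a b => decide (a.2.1 < b.2.1)) pvBefore2]
    intro a b
    simp [pvBefore2]

-- sorting the annotation of rows = annotating the per-row x-sorts
theorem pvSorted2_annot (n : Int) (rs : List (List (Int × Int × String))) :
    PySem.List.sorted2 (pvAnnot n rs) (fun p => p.1) (fun p => p.2.2.1) false
      = pvAnnot n (rs.map (fun r => PySem.List.sorted r (fun t => t.2.1) false)) := by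
  induction rs generalizing n with
  | nil => rfl
  | cons r rs ih =>
    simp only [pvAnnot, List.map_cons]
    rw [pvSorted2_append _ _ (by
        intro a ha b hb
        simp only [List.mem_map] at ha
        obtain ⟨t, _, rfl⟩ := ha
        have := pvAnnot_fst_le (n + 1) rs b hb
        simpa using lt_of_lt_of_le (by omega) this),
      pvSorted2_block, ih (n + 1)]

-- pairs of consecutive elements
theorem pvZip_tail_append (xs : List (Int × Int × String)) (x : Int × Int × String) (h : xs ≠ []) :
    (xs ++ [x]).zip ((xs ++ [x]).tail) = xs.zip xs.tail ++ [(xs.getLast h, x)] := by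
  induction xs with
  | nil => exact absurd rfl h
  | cons y ys ih =>
    cases ys with
    | nil => rfl
    | cons z zs =>
      have := ih (by simp)
      simp only [List.cons_append, List.tail_cons, List.zip_cons_cons] at this ⊢
      rw [this]
      simp [List.getLast]

-- the index loop over range(1, len(xs)) is the fold over consecutive pairs
theorem pvFoldl_pairs {β : Type} (f : β → (Int × Int × String) → (Int × Int × String) → β)
    (xs : List (Int × Int × String)) (init : β) :
    (PySem.List.pyRange 1 (PySem.List.len xs) 1).foldl
      (fun acc i => f acc (PySem.List.pyGetD xs (i - 1) (0,0,"")) (PySem.List.pyGetD xs i (0,0,""))) init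
      = (xs.zip xs.tail).foldl (fun acc p => f acc p.1 p.2) init := by
  induction xs using List.reverseRecOn with
  | nil => simp [PySem.List.pyRange_one_eq_nil]
  | append_singleton xs x ih =>
    rcases eq_or_ne xs [] with rfl | hne
    · simp [PySem.List.pyRange_one_eq_nil]
    · have hlen : 1 ≤ xs.length := by
        cases xs with | nil => exact absurd rfl hne | cons _ _ => simp
      have hlen' : PySem.List.len (xs ++ [x]) = (xs.length : Int) + 1 := by
        simp [PySem.List.len_eq]
      have hinner : (PySem.List.pyRange 1 (xs.length : Int) 1).foldl
          (fun acc i => f acc (PySem.List.pyGetD (xs ++ [x]) (i - 1) (0,0,""))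
            (PySem.List.pyGetD (xs ++ [x]) i (0,0,""))) init
          = (xs.zip xs.tail).foldl (fun acc p => f acc p.1 p.2) init := by
        rw [← ih]
        simp only [PySem.List.len_eq]
        apply PySem.List.foldl_congr_mem
        intro acc i hi
        have hmem := (PySem.List.mem_pyRange_one).mp hi
        have h1 : PySem.List.pyGetD (xs ++ [x]) i (0,0,"") = PySem.List.pyGetD xs i (0,0,"") := by
          rw [PySem.List.pyGetD_eq_getElem (xs ++ [x]) (0,0,"") (by omega) (by simp; omega),
              PySem.List.pyGetD_eq_getElem xs (0,0,"") (by omega) (by omega)]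
          rw [List.getElem_append_left]
        have h2 : PySem.List.pyGetD (xs ++ [x]) (i - 1) (0,0,"") = PySem.List.pyGetD xs (i - 1) (0,0,"") := by
          rw [PySem.List.pyGetD_eq_getElem (xs ++ [x]) (0,0,"") (by omega) (by simp; omega),
              PySem.List.pyGetD_eq_getElem xs (0,0,"") (by omega) (by omega)]
          rw [List.getElem_append_left]
        rw [h1, h2]
      have h1 : PySem.List.pyGetD (xs ++ [x]) (xs.length : Int) (0,0,"") = x := by
        rw [PySem.List.pyGetD_eq_getElem (xs ++ [x]) (0,0,"") (by omega) (by simp)]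
        simp
      have h2 : PySem.List.pyGetD (xs ++ [x]) ((xs.length : Int) - 1) (0,0,"") = xs.getLast hne := by
        rw [PySem.List.pyGetD_eq_getElem (xs ++ [x]) (0,0,"") (by omega) (by simp)]
        rw [List.getElem_append_left (by omega)]
        rw [List.getLast_eq_getElem]
        congr 1
        omega
      rw [hlen', PySem.List.pyRange_one_succ_right (by exact_mod_cast hlen), List.foldl_append,
        pvZip_tail_append xs x hne, List.foldl_append, hinner]
      simp only [List.foldl_cons, List.foldl_nil]
      rw [h1, h2]

-- the abstraction from A's (rows, current_row) state to B's (rid, keyed) state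
def pvPhi (st : List (List (Int × Int × String)) × List (Int × Int × String)) :
    Int × List (Int × (Int × Int × String)) :=
  ((st.1.length : Int), pvAnnot 0 (st.1 ++ [st.2]))

theorem pvPhi_step (st : List (List (Int × Int × String)) × List (Int × Int × String))
    (p : (Int × Int × String) × (Int × Int × String)) :
    pvPhi (if p.2.1 - p.1.1 > 1143000
           then (st.1 ++ [st.2], [p.2])
           else (st.1, st.2 ++ [p.2]))
      = (fun (st : Int × List (Int × (Int × Int × String))) pc =>
          let rid := if pc.2.1 - pc.1.1 > 1143000 then st.1 + 1 else st.1
          (rid, st.2 ++ [(rid, pc.2)])) (pvPhi st) p := by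
  by_cases hgap : p.2.1 - p.1.1 > 1143000
  · simp only [pvPhi, if_pos hgap]
    rw [pvAnnot_append_singleton 0 (st.1 ++ [st.2]) [p.2]]
    simp
  · simp only [pvPhi, if_neg hgap]
    rw [pvAnnot_append_singleton, pvAnnot_append_singleton]
    simp

-- ===== VERDICT (by name: the statement is the Claim_ definition above) =====
theorem gap_sort_slide_py_spec : Claim_equal_gap_sort_slide_py := by
  intro objects _
  unfold Spec_gap_sort_slide_py gap_sort_slide_py gap_sort_slide_py_alt
  rcases eq_or_ne objects [] with rfl | hne
  · rfl
  · rw [if_neg hne, if_neg hne]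
    dsimp only
    have hby : PySem.List.sorted objects (fun t => t.1) false ≠ [] := by
      rw [Ne, PySem.List.sorted_eq_nil_iff]; exact hne
    set by_y := PySem.List.sorted objects (fun t => t.1) false
    -- A's index loop as a pairs fold
    rw [pvFoldl_pairs (fun st a b =>
        if b.1 - a.1 > 1143000 then (st.1 ++ [st.2], [b]) else (st.1, st.2 ++ [b]))]
    rw [PySem.List.slice_from_one]
    have hφ := List.foldl_hom pvPhi
      (g₁ := fun (st : List (List (Int × Int × String)) × List (Int × Int × String))
             (p : (Int × Int × String) × (Int × Int × String)) =>
        if p.2.1 - p.1.1 > 1143000 then (st.1 ++ [st.2], [p.2]) else (st.1, st.2 ++ [p.2]))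
      (g₂ := fun (st : Int × List (Int × (Int × Int × String)))
             (pc : (Int × Int × String) × (Int × Int × String)) =>
          let rid := if pc.2.1 - pc.1.1 > 1143000 then st.1 + 1 else st.1
          (rid, st.2 ++ [(rid, pc.2)]))
      (l := by_y.zip by_y.tail)
      (init := ([], [PySem.List.pyGetD by_y 0 (0,0,"")]))
      (fun st p => (pvPhi_step st p).symm)
    have hinit : pvPhi ([], [PySem.List.pyGetD by_y 0 (0,0,"")])
        = ((0 : Int), [((0 : Int), PySem.List.pyGetD by_y 0 (0,0,""))]) := by
      simp [pvPhi, pvAnnot]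
    rw [hinit] at hφ
    set stA := List.foldl
      (fun (st : List (List (Int × Int × String)) × List (Int × Int × String))
           (p : (Int × Int × String) × (Int × Int × String)) =>
        if p.2.1 - p.1.1 > 1143000 then (st.1 ++ [st.2], [p.2]) else (st.1, st.2 ++ [p.2]))
      ([], [PySem.List.pyGetD by_y 0 (0,0,"")]) (by_y.zip by_y.tail) with hstA
    have hsnd : (List.foldl
        (fun (st : Int × List (Int × (Int × Int × String)))
             (pc : (Int × Int × String) × (Int × Int × String)) =>
          let rid := if pc.2.1 - pc.1.1 > 1143000 then st.1 + 1 else st.1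
          (rid, st.2 ++ [(rid, pc.2)]))
        ((0 : Int), [((0 : Int), PySem.List.pyGetD by_y 0 (0,0,""))]) (by_y.zip by_y.tail)).2
        = pvAnnot 0 (stA.1 ++ [stA.2]) := by
      rw [hφ]; rfl
    rw [hsnd, pvSorted2_annot, pvAnnot_map_snd,
      PySem.List.foldl_append_eq_flatMap, List.flatMap_def]
    simp
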